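-- pv_equiv track=rewrite | github.com/Mushinako/ICEC-CSULB2-2019 | Practice/20191007/10562/10562-bak1.py | get_name_and_indices
-- ===== SOURCE A (Python) =====
-- def get_name_and_indices(string, pad=0):
--     nodes = [char for char in string if char not in ' \n']
--     indices = []
--     j = 0
--     for i in range(len(string)):
--         if j >= len(nodes):
--             break
--         if string[i] == nodes[j]:
--             indices.append(i+pad)
--             j += 1
--     return (nodes, indices)
-- ===== SOURCE B (Python) =====
-- def get_name_and_indices(string, pad=0):
--     nodes = []
--     indices = []
--     for i, char in enumerate(string):
--         if char not in ' \n':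
--             nodes.append(char)
--             indices.append(i + pad)
--     return (nodes, indices)
-- ===== Notes on version B (the rewrite author's own statement) =====
-- stated objective: simpler
-- what changed: The second pass with a running j pointer, break, and string[i]==nodes[j] value matching is removed; B makes one enumerate pass testing each char against the space predicate, collecting nodes and indices together.
import Mathlib
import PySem

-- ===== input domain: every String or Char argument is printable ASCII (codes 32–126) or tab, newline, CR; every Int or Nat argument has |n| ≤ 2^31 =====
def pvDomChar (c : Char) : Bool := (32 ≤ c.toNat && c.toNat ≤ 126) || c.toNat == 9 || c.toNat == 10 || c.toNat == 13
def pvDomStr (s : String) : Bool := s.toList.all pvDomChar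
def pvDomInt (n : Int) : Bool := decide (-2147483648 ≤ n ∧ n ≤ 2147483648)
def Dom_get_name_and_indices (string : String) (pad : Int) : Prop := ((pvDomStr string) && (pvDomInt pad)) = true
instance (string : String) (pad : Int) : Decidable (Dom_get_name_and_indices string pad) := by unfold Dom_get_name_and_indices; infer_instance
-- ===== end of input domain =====

-- B replaces A's second pass (running j pointer, break, string[i]==nodes[j] matching) by one
-- enumerate pass filtering on the space predicate; objective: simpler; equivalence is proved on all inputs.

-- `char not in ' \n'` (Python's chars are 1-char strings; both ports keep Char and wrap to
-- String at the return — exact, since equality of 1-char strings coincides with Char equality)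
def pvNonspace (c : Char) : Bool := !(c == ' ' || c == '\n')

-- ===== PORT A =====
-- the `for i in range(len(string))` loop with state (indices, j); the `break` is the j-bound exit
def pvALoop (chars nodes : List Char) (pad : Int) (i j : Nat) (indices : List Int) : List Int :=
  if h : i < chars.length then
    if h2 : j < nodes.length then
      if chars[i] == nodes[j] then
        pvALoop chars nodes pad (i+1) (j+1) (indices ++ [(i : Int) + pad])
      else
        pvALoop chars nodes pad (i+1) j indices
    else indices
  else indices
termination_by chars.length - i

def get_name_and_indices (string : String) (pad : Int) : List String × List Int :=
  let chars := string.toList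
  let nodes := chars.filter pvNonspace
  (nodes.map (fun c => String.ofList [c]), pvALoop chars nodes pad 0 0 [])

-- ===== PORT B =====
def get_name_and_indices_alt (string : String) (pad : Int) : List String × List Int :=
  (PySem.List.enumerate string.toList).foldl
    (fun acc p =>
      if pvNonspace p.2 then (acc.1 ++ [String.ofList [p.2]], acc.2 ++ [p.1 + pad]) else acc)
    ([], [])

-- ===== PRECONDITION & SPEC =====
def Spec_get_name_and_indices (string : String) (pad : Int) (out : List String × List Int) : Prop := out = get_name_and_indices_alt string pad
instance (string : String) (pad : Int) (out : List String × List Int) : Decidable (Spec_get_name_and_indices string pad out) := by unfold Spec_get_name_and_indices; infer_instance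

-- ===== CLAIM (what is proved, stated in full; the proofs are below) =====
def Claim_equal_get_name_and_indices : Prop := ∀ (string : String) (pad : Int), Dom_get_name_and_indices string pad → Spec_get_name_and_indices string pad (get_name_and_indices string pad)

-- ===== LEMMAS AND PROOFS =====

-- the index list both programs compute: positions (start-offset) of non-space chars, plus pad
def pvIdxs (pad : Int) : List Char → Int → List Int
  | [], _ => []
  | c :: r, i => if pvNonspace c then (i + pad) :: pvIdxs pad r (i+1) else pvIdxs pad r (i+1)

lemma pvIdxs_eq_nil (pad : Int) : ∀ (l : List Char) (i : Int),
    l.filter pvNonspace = [] → pvIdxs pad l i = [] := by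
  intro l
  induction l with
  | nil => intro i _; rfl
  | cons c r ih =>
    intro i h
    by_cases hc : pvNonspace c
    · simp [hc] at h
    · rw [List.filter_cons, if_neg hc] at h
      simp [pvIdxs, hc, ih _ h]

lemma bfold_spec (pad : Int) : ∀ (l : List Char) (s : Int) (acc : List String × List Int),
    (PySem.List.enumerate l s).foldl
      (fun acc p =>
        if pvNonspace p.2 then (acc.1 ++ [String.ofList [p.2]], acc.2 ++ [p.1 + pad]) else acc)
      acc
    = (acc.1 ++ (l.filter pvNonspace).map (fun c => String.ofList [c]), acc.2 ++ pvIdxs pad l s) := by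
  intro l
  induction l with
  | nil => intro s acc; simp [PySem.List.enumerate_nil, pvIdxs]
  | cons c r ih =>
    intro s acc
    by_cases hc : pvNonspace c
    · simp [PySem.List.enumerate_cons, List.foldl_cons, hc, ih, pvIdxs]
    · simp [PySem.List.enumerate_cons, List.foldl_cons, hc, ih, pvIdxs]

lemma aloop_spec (full : List Char) (pad : Int) :
    ∀ (rest : List Char) (i j : Nat) (indices : List Int),
      full.drop i = rest →
      (full.filter pvNonspace).drop j = rest.filter pvNonspace →
      pvALoop full (full.filter pvNonspace) pad i j indices = indices ++ pvIdxs pad rest (i : Int) := by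
  intro rest
  induction rest with
  | nil =>
    intro i j indices hdrop _
    have hi : full.length ≤ i := List.drop_eq_nil_iff.mp hdrop
    rw [pvALoop]
    simp [pvIdxs, Nat.not_lt.mpr hi]
  | cons c r ih =>
    intro i j indices hdrop hF
    have hi : i < full.length := by
      by_contra h
      rw [List.drop_eq_nil_iff.mpr (Nat.le_of_not_lt h)] at hdrop
      simp at hdrop
    have hcons : full[i] :: full.drop (i+1) = c :: r := by
      rw [List.getElem_cons_drop hi]; exact hdrop
    have hfi : full[i] = c := (List.cons.injEq _ _ _ _ ▸ hcons).1
    have hdr : full.drop (i+1) = r := (List.cons.injEq _ _ _ _ ▸ hcons).2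
    by_cases hc : pvNonspace c
    · -- c is non-space: it heads the remaining filtered nodes, the loop matches it
      have hF' : (full.filter pvNonspace).drop j = c :: r.filter pvNonspace := by
        rw [hF, List.filter_cons, if_pos hc]
      have hj : j < (full.filter pvNonspace).length := by
        by_contra h
        rw [List.drop_eq_nil_iff.mpr (Nat.le_of_not_lt h)] at hF'
        simp at hF'
      have hconsF : (full.filter pvNonspace)[j] :: (full.filter pvNonspace).drop (j+1)
          = c :: r.filter pvNonspace := by
        rw [List.getElem_cons_drop hj]; exact hF'
      have hFj : (full.filter pvNonspace)[j] = c := (List.cons.injEq _ _ _ _ ▸ hconsF).1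
      have hFd : (full.filter pvNonspace).drop (j+1) = r.filter pvNonspace :=
        (List.cons.injEq _ _ _ _ ▸ hconsF).2
      rw [pvALoop]
      simp only [hi, hj, dif_pos, hfi, hFj, beq_self_eq_true, if_pos]
      rw [ih (i+1) (j+1) (indices ++ [(i : Int) + pad]) hdr hFd]
      simp [pvIdxs, hc]
    · -- c is space: it never equals the (non-space) current node, the loop skips it
      have hF' : (full.filter pvNonspace).drop j = r.filter pvNonspace := by
        rw [hF, List.filter_cons, if_neg hc]
      rw [pvALoop]
      by_cases hj : j < (full.filter pvNonspace).length
      · have hmem : (full.filter pvNonspace)[j] ∈ full.filter pvNonspace := List.getElem_mem _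
        have hns : pvNonspace ((full.filter pvNonspace)[j]) := (List.mem_filter.mp hmem).2
        have hne : (full[i] == (full.filter pvNonspace)[j]) = false := by
          rw [hfi]
          by_contra h
          have : c = (full.filter pvNonspace)[j] := by
            cases hb : c == (full.filter pvNonspace)[j]
            · exact absurd hb h
            · exact eq_of_beq hb
          rw [← this] at hns
          exact absurd hns (by simpa using hc)
        simp only [hi, hj, dif_pos, hne, if_neg, Bool.false_eq_true, not_false_eq_true]
        rw [ih (i+1) j indices hdr hF']
        simp [pvIdxs, hc]
      · -- nodes exhausted (break): everything left is space, no indices remain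
        have hnil : r.filter pvNonspace = [] := by
          rw [← hF', List.drop_eq_nil_iff.mpr (Nat.le_of_not_lt hj)]
        have : (c :: r).filter pvNonspace = [] := by
          rw [List.filter_cons, if_neg hc]; exact hnil
        simp [hi, hj, pvIdxs_eq_nil pad _ _ this]

-- ===== VERDICT (by name: the statement is the Claim_ definition above) =====
theorem get_name_and_indices_spec : Claim_equal_get_name_and_indices := by
  intro string pad _
  simp only [Spec_get_name_and_indices, get_name_and_indices, get_name_and_indices_alt]
  rw [bfold_spec, aloop_spec string.toList pad string.toList 0 0 [] rfl rfl]
  simp
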